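-- pv_equiv track=rewrite | github.com/raeunlee/algorithms | 프로그래머스/unrated/120896. 한 번만 등장한 문자/한 번만 등장한 문자.py | solution
-- ===== SOURCE A (Python) =====
-- from collections import Counter
--
-- def solution(s):
--     answer = ''
--     cnt = Counter(s)
--     for i in range(len(s)):
--         if cnt[s[i]] == 1:
--             answer += s[i]
--
--     ans = ''.join(sorted(answer))
--
--     return ans
-- ===== SOURCE B (Python) =====
-- def solution(s):
--     # sort first, then scan consecutive equal-character runs; keep runs of length 1
--     t = sorted(s)
--     out = []
--     while t:
--         c = t[0]
--         rest = t[1:]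
--         k = 0
--         while k < len(rest) and rest[k] == c:
--             k += 1
--         if k == 0:
--             out.append(c)
--         t = rest[k:]
--     return ''.join(out)
-- ===== Notes on version B (the rewrite author's own statement) =====
-- stated objective: alternative
-- what changed: Replaces Counter-plus-rescan (hash counting, then filtering the original string and sorting the survivors) by sort-first-then-scan: the string is sorted once and consecutive equal-character runs are scanned, keeping each character whose run has length exactly 1.
import Mathlib
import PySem

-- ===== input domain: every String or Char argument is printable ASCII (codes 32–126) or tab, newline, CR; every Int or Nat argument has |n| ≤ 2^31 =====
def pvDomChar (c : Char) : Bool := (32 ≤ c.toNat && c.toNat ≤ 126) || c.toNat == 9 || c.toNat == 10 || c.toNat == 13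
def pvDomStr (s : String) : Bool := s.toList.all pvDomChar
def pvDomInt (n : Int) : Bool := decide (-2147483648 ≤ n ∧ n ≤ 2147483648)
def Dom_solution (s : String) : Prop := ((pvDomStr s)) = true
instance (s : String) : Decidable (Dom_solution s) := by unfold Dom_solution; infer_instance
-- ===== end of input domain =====

-- B replaces Counter-then-rescan by sort-first-then-run-scan; same result, no speed claim.

-- ===== PORT A =====
-- answer = ''; cnt = Counter(s); for i in range(len(s)): if cnt[s[i]] == 1: answer += s[i]
-- return ''.join(sorted(answer))
def solution (s : String) : String :=
  let cs := s.toList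
  let cnt := PySem.Dict.counter cs
  let answer := (PySem.List.pyRange 0 (PySem.List.len cs) 1).foldl
    (fun acc i =>
      if PySem.Dict.getD cnt (PySem.List.pyGetD cs i ' ') 0 == 1
      then acc ++ [PySem.List.pyGetD cs i ' '] else acc) ([] : List Char)
  String.ofList (PySem.List.sorted answer (fun c => c) false)

-- ===== PORT B =====
-- the while loop of Source B: consume one run of equal characters per step, keep singleton runs
-- (same = the k characters the inner index loop skips; t' = rest[k:])
def scanRuns : List Char → List Char
  | [] => []
  | c :: rest =>
    let same := rest.takeWhile (fun d => d == c)
    let t' := rest.dropWhile (fun d => d == c)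
    (if same.length = 0 then [c] else []) ++ scanRuns t'
termination_by l => l.length
decreasing_by
  simp only [List.length_cons]
  exact Nat.lt_succ_of_le (List.length_dropWhile_le _ _)

def solution_alt (s : String) : String :=
  String.ofList (scanRuns (PySem.List.sorted s.toList (fun c => c) false))

-- ===== PRECONDITION & SPEC =====
def Spec_solution (s : String) (out : String) : Prop := out = solution_alt s
instance (s : String) (out : String) : Decidable (Spec_solution s out) := by unfold Spec_solution; infer_instance

-- ===== CLAIM (what is proved, stated in full; the proofs are below) =====
def Claim_equal_solution : Prop := ∀ (s : String), Dom_solution s → Spec_solution s (solution s)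

-- ===== LEMMAS AND PROOFS =====

-- On a (≤)-sorted list, scanRuns keeps exactly the characters occurring once.
theorem scanRuns_eq_filter : ∀ (n : Nat) (t : List Char), t.length ≤ n → t.Pairwise (· ≤ ·) →
    scanRuns t = t.filter (fun x => t.count x == 1) := by
  intro n
  induction n with
  | zero =>
    intro t hl _
    have ht : t = [] := List.length_eq_zero_iff.1 (Nat.le_zero.1 hl)
    subst ht; rw [scanRuns]; rfl
  | succ n ih =>
    intro t hl hp
    match t with
    | [] => rw [scanRuns]; rfl
    | c :: rest =>
      have hstep : scanRuns (c :: rest) =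
          (if (rest.takeWhile (fun d => d == c)).length = 0 then [c] else []) ++
            scanRuns (rest.dropWhile (fun d => d == c)) := by
        rw [scanRuns]
      have hhead := List.head?_dropWhile_not (fun d => d == c) rest
      have hlen := List.length_dropWhile_le (fun d => d == c) rest
      have hsplit := List.takeWhile_append_dropWhile (p := fun d => d == c) (l := rest)
      generalize htwE : rest.takeWhile (fun d => d == c) = tw at *
      generalize hdwE : rest.dropWhile (fun d => d == c) = dw at *
      have htwc : ∀ x ∈ tw, x = c := by
        intro x hx
        have := List.mem_takeWhile_imp (htwE ▸ hx)
        simpa using this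
      have hcle : ∀ x ∈ rest, c ≤ x := (List.pairwise_cons.1 hp).1
      have hpr : rest.Pairwise (· ≤ ·) := (List.pairwise_cons.1 hp).2
      have hpdw : dw.Pairwise (· ≤ ·) := hdwE ▸ (hpr.sublist (List.dropWhile_sublist _))
      have hdwgt : ∀ x ∈ dw, c < x := by
        match hd : dw with
        | [] => intro x hx; simp at hx
        | d :: dt =>
          have hdne : (d == c) = false := by simpa using hhead
          have hdmem : d ∈ rest := by rw [← hsplit]; simp
          have hcd : c < d := lt_of_le_of_ne (hcle d hdmem)
            (by intro h; rw [h] at hdne; simp at hdne)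
          intro x hx
          rcases List.mem_cons.1 hx with rfl | hx
          · exact hcd
          · exact lt_of_lt_of_le hcd (((List.pairwise_cons.1 (hd ▸ hpdw)).1) x hx)
      have hcount_c : (c :: rest).count c = 1 + tw.length := by
        rw [← hsplit, List.count_cons_self, List.count_append]
        have h1 : tw.count c = tw.length := by
          rw [List.count_eq_length]; intro x hx; exact ((htwc x hx) ▸ rfl)
        have h2 : dw.count c = 0 := by
          rw [List.count_eq_zero]; intro hmem; exact absurd rfl (ne_of_gt (hdwgt c hmem))
        omega
      have hcount_dw : ∀ x ∈ dw, (c :: rest).count x = dw.count x := by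
        intro x hx
        have hxc : x ≠ c := ne_of_gt (hdwgt x hx)
        have htw0 : tw.count x = 0 := by
          rw [List.count_eq_zero]; intro hmem
          exact hxc (htwc x hmem)
        have hcx : ¬ c = x := fun h => hxc (Eq.symm h)
        rw [← hsplit]
        simp [List.count_append, htw0, hcx]
      have hih : scanRuns dw = dw.filter (fun x => dw.count x == 1) := by
        apply ih dw _ hpdw
        simp only [List.length_cons] at hl
        omega
      rw [hstep, hih]
      set P : Char → Bool := fun x => (c :: rest).count x == 1 with hP
      have hfr : (c :: rest).filter P =
          (if P c then [c] else []) ++ (tw.filter P ++ dw.filter P) := by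
        conv_lhs => rw [show rest = tw ++ dw from hsplit.symm]
        rw [List.filter_cons, List.filter_append]
        split <;> simp
      rw [hfr]
      have htwf : tw.filter P = [] := by
        rw [List.filter_eq_nil_iff]
        intro x hx
        have hne : tw.length ≠ 0 := by
          have := List.ne_nil_of_mem hx
          simpa [List.length_eq_zero_iff] using this
        rw [htwc x hx, hP]
        simp only [beq_iff_eq, hcount_c]
        omega
      have hdwf : dw.filter P = dw.filter (fun x => dw.count x == 1) := by
        apply List.filter_congr
        intro x hx; rw [hP]; simp only [hcount_dw x hx]
      rw [htwf, hdwf, List.nil_append]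
      congr 1
      by_cases h0 : tw.length = 0
      · rw [if_pos h0, if_pos]
        rw [hP]; simp only [beq_iff_eq, hcount_c, h0]
      · rw [if_neg h0, if_neg]
        rw [hP]; simp only [beq_iff_eq, hcount_c]
        omega

-- Filtering commutes with Python's sort (any Bool predicate on Char).
theorem sorted_filter_comm (cs : List Char) (p : Char → Bool) :
    PySem.List.sorted (cs.filter p) (fun c => c) false
      = (PySem.List.sorted cs (fun c => c) false).filter p := by
  apply PySem.List.eq_of_perm_of_pairwise_le_of_injective (fun c : Char => c) (fun a b h => h)
  · exact ((PySem.List.sorted_perm (cs.filter p) (fun c : Char => c) false)).trans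
      (((PySem.List.sorted_perm cs (fun c : Char => c) false).filter p).symm)
  · exact PySem.List.sorted_pairwise _ _
  · exact (PySem.List.sorted_pairwise cs (fun c : Char => c)).filter p

-- A's loop is 'filter the characters of count 1, then sort'.
theorem solution_eq_filter_sort (s : String) :
    solution s = String.ofList (PySem.List.sorted
      (s.toList.filter (fun x => ((s.toList.count x : Int) == 1))) (fun c => c) false) := by
  show String.ofList _ = _
  rw [PySem.List.foldl_pyRange_zero_pyGetD s.toList ' '
      (fun acc x => if PySem.Dict.getD (PySem.Dict.counter s.toList) x 0 == 1 then acc ++ [x] else acc) []]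
  rw [PySem.List.foldl_append_if_eq_filter]
  simp only [List.nil_append, PySem.Dict.getD_counter]

theorem solution_eq (s : String) : solution s = solution_alt s := by
  rw [solution_eq_filter_sort, solution_alt]
  congr 1
  rw [sorted_filter_comm]
  rw [scanRuns_eq_filter (PySem.List.sorted s.toList (fun c => c) false).length _ le_rfl
      (PySem.List.sorted_pairwise s.toList (fun c : Char => c))]
  apply List.filter_congr
  intro x _
  rw [List.Perm.count_eq (PySem.List.sorted_perm s.toList (fun c : Char => c) false)]
  simp

-- ===== VERDICT (by name: the statement is the Claim_ definition above) =====
theorem solution_spec : Claim_equal_solution := by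
  intro s _
  exact solution_eq s
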